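-- pv_equiv track=rewrite | github.com/TheTimelessPuppeteer/chi-saho-wei-2026-python | weeks/week-08/solutions/1114405013/test_question_10193.py | _expected_min_b_plus_c
-- ===== SOURCE A (Python) =====
-- import math
--
-- def _expected_min_b_plus_c(a: int) -> int:
--     """以數學轉換計算正確答案（測試端參考實作）。
--
--     由題式可推得：
--         (b-a)(c-a) = a^2 + 1
--     設 d = b-a，則 d | (a^2+1)，且 c-a = (a^2+1)/d。
--     因此：
--         b + c = 2a + d + (a^2+1)/d
--     對所有正因數 d 取最小值即為答案。
--     """
--     n = a * a + 1
--     best = None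
--     limit = int(math.isqrt(n))
--
--     for d in range(1, limit + 1):
--         if n % d != 0:
--             continue
--         q = n // d
--         value = 2 * a + d + q
--         if best is None or value < best:
--             best = value
--
--     assert best is not None
--     return best
-- ===== SOURCE B (Python) =====
-- import math
--
-- def _expected_min_b_plus_c(a: int) -> int:
--     # b+c = 2a + d + (a^2+1)/d over divisors d; d + n/d is non-increasing as d
--     # grows toward sqrt(n), so the largest divisor d <= isqrt(n) is optimal.
--     n = a * a + 1
--     d = math.isqrt(n)
--     while n % d:
--         d -= 1
--     return 2 * a + d + n // d
-- ===== Notes on version B (the rewrite author's own statement) =====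
-- stated objective: simpler
-- what changed: Replaces the full enumerate-all-divisors-and-keep-a-running-minimum pass (with an Option accumulator) by a downward scan from isqrt(n) that returns at the first divisor found, relying on d + n/d being non-increasing for divisors d <= sqrt(n).
import Mathlib
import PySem

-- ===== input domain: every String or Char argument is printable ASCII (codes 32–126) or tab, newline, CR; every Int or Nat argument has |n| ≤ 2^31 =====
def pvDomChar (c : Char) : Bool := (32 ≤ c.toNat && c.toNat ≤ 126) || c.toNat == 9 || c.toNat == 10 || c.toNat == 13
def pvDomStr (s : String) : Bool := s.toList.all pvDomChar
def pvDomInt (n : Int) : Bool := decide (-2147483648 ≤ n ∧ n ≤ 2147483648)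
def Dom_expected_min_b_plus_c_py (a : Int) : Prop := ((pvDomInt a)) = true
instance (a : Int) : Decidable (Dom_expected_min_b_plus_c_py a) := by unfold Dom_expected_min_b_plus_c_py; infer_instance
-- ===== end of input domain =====

-- B replaces A's enumerate-all-divisors running-minimum pass by a downward scan from
-- isqrt(n) that returns at the first divisor found (simpler; same asymptotic cost).

-- ===== PORT A =====
-- math.isqrt is ported via Nat.sqrt; exact since its argument a*a+1 is ≥ 1.
def expected_min_b_plus_c_py (a : Int) : Int :=
  let n := a * a + 1
  let limit : Int := (Nat.sqrt n.toNat : Int)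
  let best : Option Int :=
    (PySem.List.pyRange 1 (limit + 1) 1).foldl
      (fun best d =>
        if PySem.Int.mod n d ≠ 0 then best
        else
          let q := PySem.Int.floordiv n d
          let value := 2 * a + d + q
          match best with
          | none => some value
          | some b => if value < b then some value else some b) none
  -- 'assert best is not None' never fails: limit ≥ 1 and 1 divides n, so best is some _;
  -- the 0 default below is unreachable.
  match best with
  | some b => b
  | none => 0

-- ===== PORT B =====
-- the 'while n % d: d -= 1' loop of Source B, counting d down; the 0 case is unreachable
-- since the loop stops at d = 1 (1 divides n).
def pvFindDiv (n : Int) : Nat → Int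
  | 0 => 0
  | d + 1 => if PySem.Int.mod n ((d : Int) + 1) ≠ 0 then pvFindDiv n d else (d : Int) + 1

def expected_min_b_plus_c_py_alt (a : Int) : Int :=
  let n := a * a + 1
  let d := pvFindDiv n (Nat.sqrt n.toNat)
  2 * a + d + PySem.Int.floordiv n d

-- ===== PRECONDITION & SPEC =====
def Spec_expected_min_b_plus_c_py (a : Int) (out : Int) : Prop := out = expected_min_b_plus_c_py_alt a
instance (a : Int) (out : Int) : Decidable (Spec_expected_min_b_plus_c_py a out) := by unfold Spec_expected_min_b_plus_c_py; infer_instance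

-- ===== CLAIM (what is proved, stated in full; the proofs are below) =====
def Claim_equal_expected_min_b_plus_c_py : Prop := ∀ (a : Int), Dom_expected_min_b_plus_c_py a → Spec_expected_min_b_plus_c_py a (expected_min_b_plus_c_py a)

-- ===== LEMMAS AND PROOFS =====

-- basic facts about pvFindDiv n k for 1 ≤ k: it is a divisor of n in [1, k]
lemma pvFindDiv_spec (n : Int) : ∀ (k : Nat), 1 ≤ k →
    1 ≤ pvFindDiv n k ∧ pvFindDiv n k ≤ (k : Int) ∧ PySem.Int.mod n (pvFindDiv n k) = 0 := by
  intro k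
  induction k with
  | zero => intro h; omega
  | succ d ih =>
    intro _
    by_cases h : PySem.Int.mod n ((d : Int) + 1) ≠ 0
    · rcases Nat.eq_zero_or_pos d with hd | hd
      · subst hd
        simp [PySem.Int.mod] at h
      · have := ih hd
        simp only [pvFindDiv, if_pos h]
        refine ⟨this.1, by push_cast; omega, this.2.2⟩
    · simp only [pvFindDiv, if_neg h]
      push_neg at h
      exact ⟨by omega, le_refl _, h⟩

-- core inequality: for divisors g ≤ d of n with g*d ≤ n, d + n/d ≤ g + n/g
lemma divisor_value_mono (n d g q qg : Int) (hg : 1 ≤ g) (hgd : g ≤ d)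
    (hdq : d * q = n) (hgq : g * qg = n) (hle : g * d ≤ n) : d + q ≤ g + qg := by
  nlinarith [mul_pos (by omega : (0:Int) < g) (by omega : (0:Int) < d)]

lemma floordiv_divisor (n d : Int) (hd : 0 < d) (h : PySem.Int.mod n d = 0) :
    d * PySem.Int.floordiv n d = n := by
  rw [PySem.Int.floordiv_eq_ediv_of_pos hd]
  rw [PySem.Int.mod_eq_emod_of_pos hd] at h
  exact Int.mul_ediv_cancel' (Int.dvd_of_emod_eq_zero h)

-- loop invariant relating A's fold over [1..k] to B's downward scan result
lemma fold_eq_find (n a : Int) (hn : 1 ≤ n) : ∀ (k : Nat), 1 ≤ k → (k : Int) * (k : Int) ≤ n →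
    (PySem.List.pyRange 1 ((k : Int) + 1) 1).foldl
      (fun best d =>
        if PySem.Int.mod n d ≠ 0 then best
        else
          let q := PySem.Int.floordiv n d
          let value := 2 * a + d + q
          match best with
          | none => some value
          | some b => if value < b then some value else some b) none
    = some (2 * a + pvFindDiv n k + PySem.Int.floordiv n (pvFindDiv n k)) := by
  intro k
  induction k with
  | zero => intro h; omega
  | succ d ih =>
    intro _ hsq
    rcases Nat.eq_zero_or_pos d with hd | hd
    · subst hd
      have h1 : PySem.Int.mod n 1 = 0 := by simp [PySem.Int.mod]
      rw [show ((1 : Nat) : Int) + 1 = 1 + 1 by norm_num,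
          PySem.List.pyRange_one_singleton]
      simp [pvFindDiv, h1, List.foldl]
    · -- split the range [1..d+1] = [1..d] ++ [d+1]
      have hdd : (d : Int) * (d : Int) ≤ n := by push_cast at hsq ⊢; nlinarith
      have ihd := ih hd hdd
      have hsplit : PySem.List.pyRange 1 (((d + 1 : Nat) : Int) + 1) 1
          = PySem.List.pyRange 1 ((d : Int) + 1) 1 ++ [(d : Int) + 1] := by
        have := PySem.List.pyRange_one_succ_right (a := 1) (b := (d : Int) + 1)
          (by push_cast; omega)
        rw [show ((d + 1 : Nat) : Int) + 1 = ((d : Int) + 1) + 1 by push_cast; ring]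
        exact this
      rw [hsplit, List.foldl_append, ihd]
      obtain ⟨hg1, hgle, hgmod⟩ := pvFindDiv_spec n d hd
      by_cases h : PySem.Int.mod n ((d : Int) + 1) ≠ 0
      · simp only [List.foldl, if_pos h, pvFindDiv, if_pos h]
      · push_neg at h
        -- d+1 divides n: B picks d+1; A compares value(d+1) with value(g), g = pvFindDiv n d
        have hval : ((d : Int) + 1) + PySem.Int.floordiv n ((d : Int) + 1)
            ≤ pvFindDiv n d + PySem.Int.floordiv n (pvFindDiv n d) := by
          apply divisor_value_mono n ((d : Int) + 1) (pvFindDiv n d)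
            (PySem.Int.floordiv n ((d : Int) + 1)) (PySem.Int.floordiv n (pvFindDiv n d))
            hg1 (by omega)
          · exact floordiv_divisor n _ (by omega) h
          · exact floordiv_divisor n _ (by omega) hgmod
          · have hcast : ((d + 1 : Nat) : Int) = (d : Int) + 1 := by push_cast; ring
            nlinarith [hgle, hsq, hcast ▸ hsq]
        simp only [List.foldl, pvFindDiv, if_neg (not_not_intro h)]
        by_cases hlt : 2 * a + ((d : Int) + 1) + PySem.Int.floordiv n ((d : Int) + 1)
            < 2 * a + pvFindDiv n d + PySem.Int.floordiv n (pvFindDiv n d)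
        · rw [if_pos hlt]
        · have heq : 2 * a + ((d : Int) + 1) + PySem.Int.floordiv n ((d : Int) + 1)
              = 2 * a + pvFindDiv n d + PySem.Int.floordiv n (pvFindDiv n d) := by omega
          rw [if_neg hlt, heq]

-- ===== VERDICT (by name: the statement is the Claim_ definition above) =====
theorem expected_min_b_plus_c_py_spec : Claim_equal_expected_min_b_plus_c_py := by
  intro a _
  unfold Spec_expected_min_b_plus_c_py expected_min_b_plus_c_py expected_min_b_plus_c_py_alt
  have hn : (1 : Int) ≤ a * a + 1 := by nlinarith [sq_nonneg a]
  set n := a * a + 1 with hndef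
  have hL1 : 1 ≤ Nat.sqrt n.toNat := by
    have : 1 ≤ n.toNat := by omega
    calc 1 = Nat.sqrt 1 := by norm_num
    _ ≤ Nat.sqrt n.toNat := Nat.sqrt_le_sqrt this
  have hLsq : ((Nat.sqrt n.toNat : Nat) : Int) * ((Nat.sqrt n.toNat : Nat) : Int) ≤ n := by
    have h1 : Nat.sqrt n.toNat * Nat.sqrt n.toNat ≤ n.toNat := by
      have := Nat.sqrt_le' n.toNat
      nlinarith [this]
    have h2 : ((n.toNat : Nat) : Int) = n := Int.toNat_of_nonneg (by omega)
    calc ((Nat.sqrt n.toNat : Nat) : Int) * ((Nat.sqrt n.toNat : Nat) : Int)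
        = ((Nat.sqrt n.toNat * Nat.sqrt n.toNat : Nat) : Int) := by push_cast; ring
      _ ≤ ((n.toNat : Nat) : Int) := by exact_mod_cast h1
      _ = n := h2
  show (match (PySem.List.pyRange 1 (((Nat.sqrt n.toNat : Nat) : Int) + 1) 1).foldl
      (fun best d =>
        if PySem.Int.mod n d ≠ 0 then best
        else
          let q := PySem.Int.floordiv n d
          let value := 2 * a + d + q
          match best with
          | none => some value
          | some b => if value < b then some value else some b) none with
    | some b => b
    | none => 0)
    = 2 * a + pvFindDiv n (Nat.sqrt n.toNat)
        + PySem.Int.floordiv n (pvFindDiv n (Nat.sqrt n.toNat))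
  rw [fold_eq_find n a hn (Nat.sqrt n.toNat) hL1 hLsq]
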